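-- pv_equiv track=rewrite | github.com/natemago/adventofcode-2024 | day-9-disk-fragmenter/solution.py | files
-- ===== SOURCE A (Python) =====
-- def files(disk):
--     f = []
--
--     file_id = None
--     idx = None
--     size = 0
--     for i, c in enumerate(disk):
--         if c >= 0:
--             if file_id is None:
--                 file_id = c
--                 idx = i
--             else:
--                 if file_id != c:
--                     f.append((file_id, idx, size))
--                     file_id = c
--                     idx = i
--                     size = 0
--             size += 1
--         else:
--             if file_id is not None:
--                 f.append((file_id, idx, size))
--                 size = 0
--                 file_id = None
--                 idx = None
--
--     if file_id is not None and idx is not None: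
--         f.append((file_id, idx, size))
--
--
--     return f
-- ===== SOURCE B (Python) =====
-- def files(disk):
--     # Run-splitting two-pointer scan: extract each maximal run of equal values
--     # at once, emit it when the value is a file id (>= 0), skip gaps, always
--     # advancing the start index by the run length.
--     out = []
--     n = len(disk)
--     i = 0
--     while i < n:
--         v = disk[i]
--         j = i + 1
--         while j < n and disk[j] == v:
--             j += 1
--         if v >= 0:
--             out.append((v, i, j - i))
--         i = j
--     return out
-- ===== Notes on version B (the rewrite author's own statement) =====
-- stated objective: alternative
-- what changed: Replaced A's per-element state machine (Optional current file id/start/size bookkeeping with three flush sites) by a two-pointer run-splitting scan that extracts each maximal run of equal values in one inner step and emits it directly.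
import Mathlib
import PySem

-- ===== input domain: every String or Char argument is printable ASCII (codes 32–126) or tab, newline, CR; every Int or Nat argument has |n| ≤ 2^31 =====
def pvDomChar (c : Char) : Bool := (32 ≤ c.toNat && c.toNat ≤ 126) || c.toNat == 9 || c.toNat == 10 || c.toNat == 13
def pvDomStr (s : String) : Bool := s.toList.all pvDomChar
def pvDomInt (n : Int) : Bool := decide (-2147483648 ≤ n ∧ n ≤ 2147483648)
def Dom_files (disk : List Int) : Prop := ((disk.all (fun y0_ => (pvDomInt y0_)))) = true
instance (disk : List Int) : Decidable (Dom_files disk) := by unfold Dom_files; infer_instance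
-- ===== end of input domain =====

-- B is an alternative run-splitting scan of the same linear cost; equivalence of return values (no mutation).

-- ===== PORT A =====
-- A's loop: state machine over (accumulated list, current (file_id, idx) if inside a file, size),
-- with the index i carried explicitly (Python's enumerate).
def filesLoop : List Int → Int → List (Int × Int × Int) → Option (Int × Int) → Int → List (Int × Int × Int)
  | [], _, f, cur, size =>
    match cur with
    | some (fid, idx) => f ++ [(fid, idx, size)]
    | none => f
  | c :: rest, i, f, cur, size =>
    if 0 ≤ c then
      match cur with
      | none => filesLoop rest (i + 1) f (some (c, i)) (size + 1)
      | some (fid, idx) =>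
        if fid ≠ c then filesLoop rest (i + 1) (f ++ [(fid, idx, size)]) (some (c, i)) (0 + 1)
        else filesLoop rest (i + 1) f (some (fid, idx)) (size + 1)
    else
      match cur with
      | some (fid, idx) => filesLoop rest (i + 1) (f ++ [(fid, idx, size)]) none 0
      | none => filesLoop rest (i + 1) f none size

def files (disk : List Int) : List (Int × Int × Int) :=
  filesLoop disk 0 [] none 0

-- ===== PORT B =====
-- B's outer while loop becomes recursion on the remaining list; B's inner `while … disk[j] == v`
-- scan is exactly the takeWhile/dropWhile split of the rest, and `j - i` is 1 + run length.
def filesAlt : List Int → Int → List (Int × Int × Int)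
  | [], _ => []
  | v :: rest, i =>
    let run := rest.takeWhile (· == v)
    let size : Int := 1 + (run.length : Int)
    if 0 ≤ v then (v, i, size) :: filesAlt (rest.dropWhile (· == v)) (i + size)
    else filesAlt (rest.dropWhile (· == v)) (i + size)
termination_by l _ => l.length
decreasing_by
  all_goals simpa using Nat.lt_succ_of_le (List.length_dropWhile_le (· == v) rest)

def files_alt (disk : List Int) : List (Int × Int × Int) :=
  filesAlt disk 0

-- ===== PRECONDITION & SPEC =====
def Spec_files (disk : List Int) (out : List (Int × Int × Int)) : Prop := out = files_alt disk
instance (disk : List Int) (out : List (Int × Int × Int)) : Decidable (Spec_files disk out) := by unfold Spec_files; infer_instance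

-- ===== CLAIM (what is proved, stated in full; the proofs are below) =====
def Claim_equal_files : Prop := ∀ (disk : List Int), Dom_files disk → Spec_files disk (files disk)

-- ===== LEMMAS AND PROOFS =====

theorem takeWhile_all_append (v : Int) :
    ∀ (l t : List Int), (∀ x ∈ l, x = v) → (l ++ t).takeWhile (· == v) = l ++ t.takeWhile (· == v) := by
  intro l
  induction l with
  | nil => intro t _; simp
  | cons a l ih =>
    intro t h
    have ha : a = v := h a (by simp)
    simp [ha, ih t (fun x hx => h x (by simp [hx]))]

theorem dropWhile_all_append (v : Int) :
    ∀ (l t : List Int), (∀ x ∈ l, x = v) → (l ++ t).dropWhile (· == v) = t.dropWhile (· == v) := by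
  intro l
  induction l with
  | nil => intro t _; simp
  | cons a l ih =>
    intro t h
    have ha : a = v := h a (by simp)
    simp [ha, ih t (fun x hx => h x (by simp [hx]))]

theorem takeWhile_dropWhile_nil (p : Int → Bool) :
    ∀ (l : List Int), (l.dropWhile p).takeWhile p = [] := by
  intro l
  induction l with
  | nil => simp
  | cons a l ih =>
    by_cases h : p a
    · simpa [h] using ih
    · simp [List.dropWhile_cons, h, List.takeWhile_cons]

theorem dropWhile_of_takeWhile_nil (p : Int → Bool) (t : List Int)
    (h : t.takeWhile p = []) : t.dropWhile p = t := by
  cases t with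
  | nil => simp
  | cons a t =>
    by_cases hp : p a
    · simp [hp] at h
    · simp [hp]

theorem filesAlt_cons (v : Int) (rest : List Int) (i : Int) :
    filesAlt (v :: rest) i =
      if 0 ≤ v then
        (v, i, 1 + ((rest.takeWhile (· == v)).length : Int))
          :: filesAlt (rest.dropWhile (· == v)) (i + (1 + ((rest.takeWhile (· == v)).length : Int)))
      else filesAlt (rest.dropWhile (· == v)) (i + (1 + ((rest.takeWhile (· == v)).length : Int))) := by
  rw [filesAlt]

-- skipping a run of equal negative values just advances the start index
theorem filesAlt_skip_neg (v : Int) (hv : v < 0) :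
    ∀ (l t : List Int) (j : Int), (∀ x ∈ l, x = v) → t.takeWhile (· == v) = [] →
      filesAlt (l ++ t) j = filesAlt t (j + (l.length : Int)) := by
  intro l t j hl ht
  cases l with
  | nil => simp
  | cons a l =>
    have ha : a = v := hl a (by simp)
    have hl' : ∀ x ∈ l, x = v := fun x hx => hl x (by simp [hx])
    have h1 : (l ++ t).takeWhile (· == v) = l := by
      rw [takeWhile_all_append v l t hl', ht, List.append_nil]
    have h2 : (l ++ t).dropWhile (· == v) = t := by
      rw [dropWhile_all_append v l t hl', dropWhile_of_takeWhile_nil _ _ ht]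
    subst ha
    rw [show (a :: l) ++ t = a :: (l ++ t) by simp, filesAlt]
    simp only [h1, h2, if_neg (by omega : ¬ 0 ≤ a)]
    congr 1
    push_cast [List.length_cons]
    ring

theorem filesAlt_skip_run (c : Int) (hc : c < 0) (rest : List Int) (j : Int) :
    filesAlt rest j
      = filesAlt (rest.dropWhile (· == c)) (j + ((rest.takeWhile (· == c)).length : Int)) := by
  have hsplit : rest = rest.takeWhile (· == c) ++ rest.dropWhile (· == c) :=
    (List.takeWhile_append_dropWhile).symm
  calc filesAlt rest j
      = filesAlt (rest.takeWhile (· == c) ++ rest.dropWhile (· == c)) j := by rw [← hsplit]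
    _ = filesAlt (rest.dropWhile (· == c)) (j + ((rest.takeWhile (· == c)).length : Int)) := by
        apply filesAlt_skip_neg c hc
        · intro x hx
          exact eq_of_beq (List.mem_takeWhile_imp (p := fun y => y == c) hx)
        · exact takeWhile_dropWhile_nil _ _

-- the combined loop invariant: A's state machine equals B's run-splitting scan,
-- both from the idle state (none) and from inside a file run (some (fid, idx))
theorem filesLoop_main : ∀ (n : ℕ) (disk : List Int), disk.length ≤ n →
    ((∀ (i : Int) (f : List (Int × Int × Int)),
        filesLoop disk i f none 0 = f ++ filesAlt disk i) ∧
     (∀ (i : Int) (f : List (Int × Int × Int)) (fid idx size : Int), 0 ≤ fid →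
        filesLoop disk i f (some (fid, idx)) size =
          f ++ [(fid, idx, size + ((disk.takeWhile (· == fid)).length : Int))]
            ++ filesAlt (disk.dropWhile (· == fid))
                (i + ((disk.takeWhile (· == fid)).length : Int)))) := by
  intro n
  induction n with
  | zero =>
    intro disk h
    have : disk = [] := List.length_eq_zero_iff.mp (Nat.le_zero.mp h)
    subst this
    constructor
    · intro i f; simp [filesLoop, filesAlt]
    · intro i f fid idx size _; simp [filesLoop, filesAlt]
  | succ n ih =>
    intro disk h
    cases disk with
    | nil =>
      constructor
      · intro i f; simp [filesLoop, filesAlt]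
      · intro i f fid idx size _; simp [filesLoop, filesAlt]
    | cons c rest =>
      have hrest : rest.length ≤ n := by simpa using Nat.succ_le_succ_iff.mp h
      constructor
      · -- idle state
        intro i f
        by_cases hc : 0 ≤ c
        · rw [filesLoop, if_pos hc]
          rw [(ih rest hrest).2 (i + 1) f c i (0 + 1) hc]
          rw [filesAlt_cons, if_pos hc]
          simp only [List.append_assoc, List.cons_append, List.nil_append]
          push_cast [List.length_cons]
          ring_nf
        · rw [filesLoop, if_neg hc]
          rw [(ih rest hrest).1 (i + 1) f]
          rw [filesAlt_cons, if_neg hc]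
          rw [filesAlt_skip_run c (by omega) rest (i + 1)]
          push_cast [List.length_cons]
          ring_nf
      · -- inside a run of file id fid
        intro i f fid idx size hfid
        by_cases hc : 0 ≤ c
        · by_cases heq : fid = c
          · subst heq
            rw [filesLoop, if_pos hc, if_neg (by simp)]
            rw [(ih rest hrest).2 (i + 1) f fid idx (size + 1) hfid]
            simp only [List.takeWhile_cons, BEq.rfl, List.dropWhile_cons, if_true]
            push_cast [List.length_cons]
            ring_nf
          · rw [filesLoop, if_pos hc, if_pos heq]
            rw [(ih rest hrest).2 (i + 1) (f ++ [(fid, idx, size)]) c i (0 + 1) hc]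
            have hne : (c == fid) = false := by
              simp; exact fun hcf => heq hcf.symm
            simp only [List.takeWhile_cons, hne, List.dropWhile_cons, Bool.false_eq_true, if_false]
            rw [filesAlt_cons, if_pos hc]
            simp only [List.length_nil, Int.natCast_zero, add_zero, List.append_assoc,
              List.cons_append, List.nil_append]
            push_cast [List.length_cons]
            ring_nf
        · rw [filesLoop, if_neg hc]
          rw [(ih rest hrest).1 (i + 1) (f ++ [(fid, idx, size)])]
          have hne : (c == fid) = false := by
            simp; omega
          simp only [List.takeWhile_cons, hne, List.dropWhile_cons, Bool.false_eq_true, if_false]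
          rw [filesAlt_cons, if_neg hc]
          rw [filesAlt_skip_run c (by omega) rest (i + 1)]
          simp only [List.length_nil, Int.natCast_zero, add_zero, List.append_assoc,
            List.cons_append, List.nil_append]
          push_cast [List.length_cons]
          ring_nf

-- ===== VERDICT (by name: the statement is the Claim_ definition above) =====
theorem files_spec : Claim_equal_files := by
  intro disk _
  unfold Spec_files files files_alt
  simpa using (filesLoop_main disk.length disk le_rfl).1 0 []
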